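-- pv_equiv track=rewrite | github.com/andreasturesson/Thesis-Project | Dataset/ensemble_process_training_data.py | pair_letter_number
-- ===== SOURCE A (Python) =====
-- def pair_letter_number(string):
--     counter = 0
--
--     for idx, char in enumerate(string):
--         if (int(ord(char)) >= 97 and int(ord(char)) <= 122):
--             if idx != len(string)-1:
--                 if (int(ord(string[idx+1])) >= 48 and int(ord(string[idx+1])) <= 57):
--                     counter += 1
--     return counter
-- ===== SOURCE B (Python) =====
-- import re
--
-- def pair_letter_number(string):
--     return len(re.findall(r'[a-z][0-9]', string))
-- ===== Notes on version B (the rewrite author's own statement) =====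
-- stated objective: idiomatic
-- what changed: Replaces the index-based lookahead loop with a single regex scan counting non-overlapping matches of an ASCII lowercase letter followed by a digit; a digit can never start a match, so the counts agree.
import Mathlib
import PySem

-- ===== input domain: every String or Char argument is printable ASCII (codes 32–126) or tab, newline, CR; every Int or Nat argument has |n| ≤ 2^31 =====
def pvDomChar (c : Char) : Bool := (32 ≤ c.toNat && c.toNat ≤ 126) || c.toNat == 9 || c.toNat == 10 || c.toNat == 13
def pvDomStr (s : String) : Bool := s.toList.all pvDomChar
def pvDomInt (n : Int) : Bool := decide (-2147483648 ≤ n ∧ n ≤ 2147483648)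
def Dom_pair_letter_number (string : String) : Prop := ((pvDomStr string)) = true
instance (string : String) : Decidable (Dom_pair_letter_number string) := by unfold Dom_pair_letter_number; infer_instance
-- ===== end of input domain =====

-- B replaces the index-based lookahead loop with a regex-style left-to-right scan
-- counting non-overlapping lowercase-then-digit matches (objective: idiomatic).


-- ===== PORT A =====
-- loop body of A's for-loop (p = (idx, char))
def pvStepA (s : String) (counter : Int) (p : Int × Char) : Int :=
  if (97 : Int) ≤ (p.2.toNat : Int) ∧ (p.2.toNat : Int) ≤ 122 then
    if p.1 ≠ PySem.Str.len s - 1 then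
      match PySem.Str.pyGet? s (p.1 + 1) with
      | some c2 =>
        if (48 : Int) ≤ (c2.toNat : Int) ∧ (c2.toNat : Int) ≤ 57 then counter + 1 else counter
      | none => counter
    else counter
  else counter

def pair_letter_number (string : String) : Int :=
  (PySem.List.enumerate string.toList).foldl (pvStepA string) 0

-- ===== PORT B =====
-- character classes of the regex [a-z][0-9], literal ASCII ranges
def pvIsLower (c : Char) : Bool := 97 ≤ c.toNat && c.toNat ≤ 122
def pvIsDigit (c : Char) : Bool := 48 ≤ c.toNat && c.toNat ≤ 57

-- the regex engine's scan: try to match at the current position; on a match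
-- consume both characters (matches are non-overlapping), otherwise advance one
def pvScan : List Char → Int
  | a :: b :: rest =>
    if pvIsLower a && pvIsDigit b then 1 + pvScan rest else pvScan (b :: rest)
  | _ => 0

def pair_letter_number_alt (string : String) : Int := pvScan string.toList

-- ===== PRECONDITION & SPEC =====
def Spec_pair_letter_number (string : String) (out : Int) : Prop := out = pair_letter_number_alt string
instance (string : String) (out : Int) : Decidable (Spec_pair_letter_number string out) := by unfold Spec_pair_letter_number; infer_instance

-- ===== CLAIM (what is proved, stated in full; the proofs are below) =====
def Claim_equal_pair_letter_number : Prop := ∀ (string : String), Dom_pair_letter_number string → Spec_pair_letter_number string (pair_letter_number string)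

-- ===== LEMMAS AND PROOFS =====

-- proof helper: count of adjacent (lower, digit) pairs, advancing one position at a time
def pvCP : List Char → Int
  | a :: b :: rest => (if pvIsLower a && pvIsDigit b then 1 else 0) + pvCP (b :: rest)
  | _ => 0

theorem pvCP_cons_not_lower (b : Char) (l : List Char) (h : pvIsLower b = false) :
    pvCP (b :: l) = pvCP l := by
  cases l with
  | nil => simp [pvCP]
  | cons c rest => simp [pvCP, h]

theorem not_lower_of_digit (b : Char) (h : pvIsDigit b = true) : pvIsLower b = false := by
  simp only [pvIsDigit, Bool.and_eq_true, decide_eq_true_eq] at h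
  simp only [pvIsLower, Bool.and_eq_false_iff, decide_eq_false_iff_not]
  omega

theorem pvScan_eq_pvCP (l : List Char) : pvScan l = pvCP l := by
  induction l using pvScan.induct with
  | case1 a b rest h ih =>
    have hd : pvIsDigit b = true := by
      simp only [Bool.and_eq_true] at h; exact h.2
    rw [pvScan, pvCP, if_pos h, ih, pvCP_cons_not_lower b rest (not_lower_of_digit b hd), h]
    simp
  | case2 a b rest h ih =>
    rw [pvScan, pvCP, if_neg h, ih]
    simp [Bool.eq_false_iff.mpr h]
  | case3 l h => cases l with
    | nil => rfl
    | cons a t => cases t with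
      | nil => rfl
      | cons b r => exact absurd rfl (h a b r)

-- A's fold over a suffix of the string, started at index pre.length, adds pvCP of the suffix
theorem pairA_fold (s : String) :
    ∀ (suf pre : List Char), s.toList = pre ++ suf → ∀ (c : Int),
    (PySem.List.enumerate suf (pre.length : Int)).foldl (pvStepA s) c = c + pvCP suf := by
  intro suf
  induction suf with
  | nil => intro pre _ c; simp [PySem.List.enumerate, pvCP]
  | cons a suf' ih =>
    intro pre hsplit c
    rw [PySem.List.enumerate_cons, List.foldl_cons]
    have hlen : PySem.Str.len s = (pre.length : Int) + 1 + suf'.length := by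
      rw [PySem.Str.len_eq, hsplit]; simp; omega
    have hsplit' : s.toList = (pre ++ [a]) ++ suf' := by simp [hsplit]
    have hstep : ((pre.length : Int) + 1) = ((pre ++ [a]).length : Int) := by simp
    cases suf' with
    | nil =>
      -- a is the last character: the idx ≠ len-1 guard is false
      have heq : (pre.length : Int) = PySem.Str.len s - 1 := by
        rw [hlen]; simp
      have hA : pvStepA s c ((pre.length : Int), a) = c := by
        unfold pvStepA; simp [heq]
      rw [hA]; simp [PySem.List.enumerate, pvCP]
    | cons b rest =>
      have hidx : (pre.length : Int) ≠ PySem.Str.len s - 1 := by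
        rw [hlen]; simp only [List.length_cons]; push_cast; omega
      have hget : PySem.Str.pyGet? s ((pre.length : Int) + 1) = some b := by
        rw [PySem.Str.pyGet?_eq, hstep, hsplit']
        exact PySem.List.pyGet?_append_length _ _ _
      have hA : pvStepA s c ((pre.length : Int), a) =
          c + (if pvIsLower a && pvIsDigit b then 1 else 0) := by
        unfold pvStepA
        simp only [hidx, ne_eq, not_false_iff, if_true, hget]
        by_cases hl : (97 : Int) ≤ (a.toNat : Int) ∧ (a.toNat : Int) ≤ 122
        · by_cases hd : (48 : Int) ≤ (b.toNat : Int) ∧ (b.toNat : Int) ≤ 57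
          · have : (pvIsLower a && pvIsDigit b) = true := by
              simp [pvIsLower, pvIsDigit]; omega
            simp [hl, this]
            omega
          · have : (pvIsLower a && pvIsDigit b) = false := by
              simp only [pvIsLower, pvIsDigit] at *
              simp; omega
            simp [hl, this]
            omega
        · have : (pvIsLower a && pvIsDigit b) = false := by
            simp only [pvIsLower, pvIsDigit] at *
            simp; omega
          simp [this]
          omega
      rw [hA]
      have ih' := ih (pre ++ [a]) hsplit' (c + (if pvIsLower a && pvIsDigit b then 1 else 0))
      rw [hstep, ih', pvCP]
      ring

-- ===== VERDICT (by name: the statement is the Claim_ definition above) =====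
theorem pair_letter_number_spec : Claim_equal_pair_letter_number := by
  intro s _
  unfold Spec_pair_letter_number pair_letter_number pair_letter_number_alt
  rw [pvScan_eq_pvCP]
  have h := pairA_fold s s.toList [] (by simp) 0
  simpa using h
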